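-- pv_equiv track=rewrite | github.com/kh277/BOJ | 백준/Silver/22973. 점프 숨바꼭질/점프 숨바꼭질.py | solve
-- ===== SOURCE A (Python) =====
-- def solve(K: int) -> int:
--     # 짝수 경우 제거
--     if K == 0:
--         return 0
--     elif K % 2 == 0:
--         return -1
--
--     # 1인 경우
--     if abs(K) == 1:
--         return 1
--
--     # 1이 아닌 홀수의 경우
--     for i in range(2, 36):
--         if 2**(i-1) + 1 <= abs(K) <= 2**i - 1:
--             return i
-- ===== SOURCE B (Python) =====
-- def solve(K: int) -> int:
--     if K == 0:
--         return 0
--     if K % 2 == 0: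
--         return -1
--     return abs(K).bit_length()
-- ===== Notes on version B (the rewrite author's own statement) =====
-- stated objective: simpler
-- what changed: Replaced the bounded power-of-2 bucket search loop with the closed form abs(K).bit_length(), which yields the same bucket index for every odd K.
import Mathlib
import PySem

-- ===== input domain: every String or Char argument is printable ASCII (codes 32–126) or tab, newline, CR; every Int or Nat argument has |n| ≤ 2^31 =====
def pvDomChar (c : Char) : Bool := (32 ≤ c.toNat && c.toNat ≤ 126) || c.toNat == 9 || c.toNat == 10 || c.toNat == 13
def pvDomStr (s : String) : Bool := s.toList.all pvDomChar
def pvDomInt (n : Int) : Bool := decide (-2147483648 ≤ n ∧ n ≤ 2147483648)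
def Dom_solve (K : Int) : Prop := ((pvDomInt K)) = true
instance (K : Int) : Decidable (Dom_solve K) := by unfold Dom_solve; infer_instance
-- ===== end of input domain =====

-- B replaces A's bounded power-of-2 bucket search loop by the closed form abs(K).bit_length() (simpler).

-- ===== PORT A =====
-- the for-loop over range(2, 36); returns i at the first matching bucket.
-- On Dom (|K| ≤ 2^31) a bucket always matches; the -1 fallback of the empty case
-- corresponds to Python's implicit None, which no input in Dom reaches.
def solveLoop (a : Int) : List Int → Int
  | [] => -1
  | i :: rest =>
      if 2 ^ ((i - 1).toNat) + 1 ≤ a ∧ a ≤ 2 ^ (i.toNat) - 1 then i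
      else solveLoop a rest

def solve (K : Int) : Int :=
  if K = 0 then 0
  else if PySem.Int.mod K 2 = 0 then -1
  else if |K| = 1 then 1
  else solveLoop |K| (PySem.List.pyRange 2 36 1)

-- ===== PORT B =====
-- Nat.size is Lean's counterpart of Python's int.bit_length()
def solve_alt (K : Int) : Int :=
  if K = 0 then 0
  else if PySem.Int.mod K 2 = 0 then -1
  else (Nat.size K.natAbs : Int)

-- ===== PRECONDITION & SPEC =====
def Spec_solve (K : Int) (out : Int) : Prop := out = solve_alt K
instance (K : Int) (out : Int) : Decidable (Spec_solve K out) := by unfold Spec_solve; infer_instance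

-- ===== CLAIM (what is proved, stated in full; the proofs are below) =====
def Claim_equal_solve : Prop := ∀ (K : Int), Dom_solve K → Spec_solve K (solve K)

-- ===== LEMMAS AND PROOFS =====

-- the loop starting at j returns the bit length of a, for odd a already past the j-1 bucket
lemma loop_finds : ∀ (m : Nat) (j a : Int), j + (m : Int) = 36 → 2 ≤ j →
    a % 2 = 1 → 2 ^ ((j - 1).toNat) < a → a < 2 ^ 35 →
    solveLoop a (PySem.List.pyRange j 36 1) = (Nat.size a.toNat : Int) := by
  intro m
  induction m with
  | zero =>
      intro j a hm h2 hodd hlow hhi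
      have hj : j = 36 := by omega
      subst hj
      have ht : ((36:Int) - 1).toNat = 35 := by decide
      rw [ht] at hlow
      omega
  | succ m ih =>
      intro j a hm h2 hodd hlow hhi
      have hjlt : j < 36 := by omega
      rw [PySem.List.pyRange_one_cons hjlt]
      unfold solveLoop
      split_ifs with hcond
      · -- bucket matched: j is the bit length of a
        obtain ⟨h1, h2'⟩ := hcond
        have hapos : 0 < a := lt_trans (by positivity) hlow
        set t := a.toNat with ht
        have hta : (t : Int) = a := Int.toNat_of_nonneg (le_of_lt hapos)
        have hjn : ((j.toNat : Int)) = j := Int.toNat_of_nonneg (by omega)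
        have hjm1 : (j - 1).toNat = j.toNat - 1 := by omega
        have hlt : t < 2 ^ j.toNat := by
          have : a < (2 : Int) ^ j.toNat := by omega
          have h2c : ((2 : Nat) ^ j.toNat : Int) = (2 : Int) ^ j.toNat := by push_cast; ring
          omega
        have hge : 2 ^ (j.toNat - 1) ≤ t := by
          have h2c : ((2 : Nat) ^ (j.toNat - 1) : Int) = (2 : Int) ^ (j.toNat - 1) := by
            push_cast; ring
          rw [hjm1] at hlow
          omega
        have hs1 : Nat.size t ≤ j.toNat := Nat.size_le.mpr hlt
        have hs2 : j.toNat - 1 < Nat.size t := Nat.lt_size.mpr hge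
        have : Nat.size t = j.toNat := by omega
        omega
      · -- bucket missed: a is above it (the lower bound holds by hlow), recurse
        have hup : 2 ^ (j.toNat) - 1 < a := by
          have hjm1 : (j - 1).toNat = j.toNat - 1 := by omega
          rcases not_and_or.mp hcond with h | h
          · omega
          · omega
        have heven : (2 : Int) ^ j.toNat % 2 = 0 := by
          have : 1 ≤ j.toNat := by omega
          obtain ⟨k, hk⟩ := Nat.exists_eq_add_of_le this
          rw [hk, pow_add, pow_one]
          omega
        have hnext : 2 ^ ((j + 1 - 1).toNat) < a := by
          have : (j + 1 - 1).toNat = j.toNat := by omega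
          rw [this]
          omega
        exact ih (j + 1) a (by omega) (by omega) hodd hnext hhi

lemma size_natAbs_one : (Nat.size 1 : Int) = 1 := by decide

-- ===== VERDICT (by name: the statement is the Claim_ definition above) =====
theorem solve_spec : Claim_equal_solve := by
  intro K hdom
  unfold Spec_solve solve solve_alt
  split_ifs with h0 hmod h1
  · rfl
  · rfl
  · -- |K| = 1
    have : K.natAbs = 1 := by
      have := abs_eq (a := K) (b := 1) (by norm_num) |>.mp h1
      omega
    rw [this, size_natAbs_one]
  · -- odd K, |K| ≥ 3
    have hodd : K % 2 = 1 := by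
      rw [PySem.Int.mod_eq_emod_of_pos (by norm_num)] at hmod
      omega
    have hK : |K| % 2 = 1 := by
      rcases abs_choice K with h | h <;> rw [h] <;> omega
    have habs3 : 3 ≤ |K| := by
      have h1' : |K| ≠ 1 := h1
      have : 0 < |K| := abs_pos.mpr h0
      omega
    have hhi : |K| < 2 ^ 35 := by
      have : -2147483648 ≤ K ∧ K ≤ 2147483648 := by
        simpa [Dom_solve, pvDomInt] using hdom
      rcases abs_choice K with h | h <;> rw [h] <;> norm_num <;> omega
    have hlow : 2 ^ (((2 : Int) - 1).toNat) < |K| := by norm_num; omega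
    have := loop_finds 34 2 |K| (by norm_num) (by norm_num) hK hlow hhi
    rw [this]
    congr 1
    have : |K| = (K.natAbs : Int) := by
      rcases abs_choice K with h | h <;> rw [h] <;> omega
    rw [this, Int.toNat_natCast]
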